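-- pv_equiv track=rewrite | github.com/skdltn210/Algorithm | 프로그래머스/lv2/76502. 괄호 회전하기/괄호 회전하기.py | solution
-- ===== SOURCE A (Python) =====
-- def solution(s):
--     cnt = 0
--     for j in range(len(s)):
--         lst = []
--         for i in range(len(s)):
--             lst.append(s[i])
--             if len(lst) >= 2:
--                 if lst[-1] == ']' and lst[-2] == '[':
--                     lst.pop()
--                     lst.pop()
--                 elif lst[-1] == ')' and lst[-2] == '(':
--                     lst.pop()
--                     lst.pop()
--                 elif lst[-1] == '}' and lst[-2] == '{':
--                     lst.pop()
--                     lst.pop()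
--         if len(lst) == 0:
--             cnt += 1
--         s = s[1:] + s[0:1]
--     return cnt
-- ===== SOURCE B (Python) =====
-- def solution(s):
--     cnt = 0
--     n = len(s)
--     for j in range(n):
--         t = s[j:] + s[:j]
--         while True:
--             u = t.replace('()', '').replace('[]', '').replace('{}', '')
--             if u == t:
--                 break
--             t = u
--         if t == '':
--             cnt += 1
--     return cnt
-- ===== Notes on version B (the rewrite author's own statement) =====
-- stated objective: alternative
-- what changed: Replaces A's per-character stack with push/pop pair cancellation by repeated substring elimination: each rotation is reduced by t.replace('()','').replace('[]','').replace('{}','') until a fixpoint and counted if it reduces to the empty string.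
import Mathlib
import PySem

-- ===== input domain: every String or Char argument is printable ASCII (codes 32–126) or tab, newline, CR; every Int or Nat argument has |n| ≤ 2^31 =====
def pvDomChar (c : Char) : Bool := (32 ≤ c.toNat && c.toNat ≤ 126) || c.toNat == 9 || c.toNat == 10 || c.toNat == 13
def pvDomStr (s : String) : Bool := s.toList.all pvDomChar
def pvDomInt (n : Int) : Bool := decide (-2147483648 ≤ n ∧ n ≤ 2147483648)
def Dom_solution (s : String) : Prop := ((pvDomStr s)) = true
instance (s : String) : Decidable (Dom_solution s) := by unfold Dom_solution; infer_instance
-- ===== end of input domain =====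

-- B replaces A's per-character stack check of each rotation by repeated substring
-- elimination (t.replace('()','').replace('[]','').replace('{}','') until a fixpoint),
-- counting the rotations that reduce to the empty string: a different mechanism of
-- similar cost ('alternative'), no speed claim.

-- ===== PORT A =====
-- body of A's inner loop: lst.append(s[i]); if len(lst) >= 2: the three matched-pair checks, two pops each
def solStep (lst : List Char) (ch : Char) : List Char :=
  let l := lst ++ [ch]
  if 2 ≤ l.length then
    if PySem.List.pyGet? l (-1) = some ']' ∧ PySem.List.pyGet? l (-2) = some '[' then
      l.dropLast.dropLast
    else if PySem.List.pyGet? l (-1) = some ')' ∧ PySem.List.pyGet? l (-2) = some '(' then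
      l.dropLast.dropLast
    else if PySem.List.pyGet? l (-1) = some '}' ∧ PySem.List.pyGet? l (-2) = some '{' then
      l.dropLast.dropLast
    else l
  else l

def solution (str : String) : Int :=
  let s0 := str.toList
  ((PySem.List.pyRange 0 (s0.length : Int) 1).foldl
    (fun (st : List Char × Int) _ =>
      let s := st.1
      let lst := (PySem.List.pyRange 0 (s.length : Int) 1).foldl
        (fun lst i => solStep lst (PySem.List.pyGetD s i ' ')) []
      let cnt := if lst.length = 0 then st.2 + 1 else st.2
      (PySem.List.slice s (some 1) none ++ PySem.List.slice s (some 0) (some 1), cnt))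
    (s0, 0)).2

-- ===== PORT B =====
-- the chained three replaces of Source B's loop body
def rep3 (t : List Char) : List Char :=
  PySem.Chars.replace (PySem.Chars.replace (PySem.Chars.replace t ['(', ')'] []) ['[', ']'] []) ['{', '}'] []

-- Source B's 'while True: u = t.replace(...); if u == t: break; t = u'.
-- The loop shrinks t on every non-final pass, so fuel t.length + 1 always suffices
-- to reach the fixpoint (reduceGo_fixed below); the fuel only makes it structural.
def reduceGo : Nat → List Char → List Char
  | 0, t => t
  | fuel + 1, t =>
    let u := rep3 t
    if u = t then t else reduceGo fuel u

def reduceLoop (t : List Char) : List Char := reduceGo (t.length + 1) t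

def solution_alt (str : String) : Int :=
  let s := str.toList
  let n := s.length
  (PySem.List.pyRange 0 (n : Int) 1).foldl
    (fun (cnt : Int) j =>
      let t := PySem.List.slice s (some j) none ++ PySem.List.slice s none (some j)
      let t := reduceLoop t
      if t = [] then cnt + 1 else cnt) 0

-- ===== PRECONDITION & SPEC =====
def Spec_solution (s : String) (out : Int) : Prop := out = solution_alt s
instance (s : String) (out : Int) : Decidable (Spec_solution s out) := by unfold Spec_solution; infer_instance

-- ===== CLAIM (what is proved, stated in full; the proofs are below) =====
def Claim_equal_solution : Prop := ∀ (s : String), Dom_solution s → Spec_solution s (solution s)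

-- ===== LEMMAS AND PROOFS =====

def pvMatched (a b : Char) : Prop :=
  (a = '[' ∧ b = ']') ∨ (a = '(' ∧ b = ')') ∨ (a = '{' ∧ b = '}')

-- proof helper used ONLY to justify termination of reduceLoop below: remPair o c
-- characterizes one pass of PySem.Chars.replace [o,c] with empty replacement
def remPair (o c : Char) : List Char → List Char
  | [] => []
  | [a] => [a]
  | a :: b :: t => if a = o ∧ b = c then remPair o c t else a :: remPair o c (b :: t)
termination_by l => l.length
decreasing_by all_goals simp

theorem remPair_le (o c : Char) (l : List Char) : (remPair o c l).length ≤ l.length := by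
  fun_induction remPair o c l with
  | case1 => simp
  | case2 => simp
  | case3 a b t h ih => simp only [List.length_cons]; omega
  | case4 a b t h ih => simp only [List.length_cons] at ih ⊢; omega

theorem remPair_eq_or_lt (o c : Char) (l : List Char) :
    remPair o c l = l ∨ (remPair o c l).length < l.length := by
  fun_induction remPair o c l with
  | case1 => left; rfl
  | case2 => left; rfl
  | case3 a b t h ih =>
      right
      have := remPair_le o c t
      simp only [List.length_cons]
      omega
  | case4 a b t h ih =>
      rcases ih with h1 | h1
      · left; rw [h1]
      · right; simp only [List.length_cons] at h1 ⊢; omega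

-- PySem.Chars.replace.go with empty replacement computes remPair
theorem go_spec (o c : Char) : ∀ (fuel : Nat) (l acc : List Char), l.length ≤ fuel →
    PySem.Chars.replace.go [o, c] [] fuel l acc = acc.reverse ++ remPair o c l := by
  intro fuel
  induction fuel with
  | zero =>
      intro l acc h
      have : l = [] := List.length_eq_zero_iff.mp (Nat.le_zero.mp h)
      subst this
      simp [PySem.Chars.replace.go, remPair]
  | succ n ih =>
      intro l acc h
      cases l with
      | nil => simp [PySem.Chars.replace.go, remPair]
      | cons c1 t =>
          by_cases hp : [o, c].isPrefixOf (c1 :: t)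
          · obtain ⟨t2, ht, hc1⟩ : ∃ t2, t = c :: t2 ∧ c1 = o := by
              cases t with
              | nil => simp [List.isPrefixOf] at hp
              | cons b t2 =>
                  simp [List.isPrefixOf] at hp
                  obtain ⟨ho, hb⟩ := hp
                  exact ⟨t2, by simp [hb], by simp [ho]⟩
            subst ht; subst hc1
            rw [PySem.Chars.replace.go]
            simp only [if_pos hp]
            have hdrop : List.drop [c1, c].length (c1 :: c :: t2) = t2 := rfl
            rw [hdrop]
            have hlen : t2.length ≤ n := by simp at h; omega
            rw [ih _ _ hlen]
            simp [remPair]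
          · rw [PySem.Chars.replace.go]
            simp only [if_neg hp]
            have hlen : t.length ≤ n := by simp at h; omega
            rw [ih _ _ hlen]
            have hr : remPair o c (c1 :: t) = c1 :: remPair o c t := by
              cases t with
              | nil => simp [remPair]
              | cons b t2 =>
                  have : ¬ (c1 = o ∧ b = c) := by
                    rintro ⟨rfl, rfl⟩
                    simp [List.isPrefixOf] at hp
                  simp [remPair, this]
            rw [hr]
            simp

theorem replace_pair (o c : Char) (l : List Char) :
    PySem.Chars.replace l [o, c] [] = remPair o c l := by
  rw [PySem.Chars.replace, if_neg (by simp)]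
  exact go_spec o c l.length l [] le_rfl

theorem rep3_eq_or_lt (t : List Char) : rep3 t = t ∨ (rep3 t).length < t.length := by
  unfold rep3
  rw [replace_pair, replace_pair, replace_pair]
  have a1 := remPair_le '(' ')' t
  have a2 := remPair_le '[' ']' (remPair '(' ')' t)
  have a3 := remPair_le '{' '}' (remPair '[' ']' (remPair '(' ')' t))
  rcases remPair_eq_or_lt '(' ')' t with h1 | h1 <;>
    rcases remPair_eq_or_lt '[' ']' (remPair '(' ')' t) with h2 | h2 <;>
    rcases remPair_eq_or_lt '{' '}' (remPair '[' ']' (remPair '(' ')' t)) with h3 | h3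
  · left; rw [h3, h2, h1]
  all_goals right <;> omega

theorem solStep_push (L : List Char) (a : Char)
    (h : ∀ x, L.getLast? = some x → ¬ pvMatched x a) : solStep L a = L ++ [a] := by
  rcases List.eq_nil_or_concat L with rfl | ⟨M, x, rfl⟩
  · simp [solStep]
  · simp only [List.concat_eq_append] at h ⊢
    have hx := h x (by simp)
    simp only [pvMatched, not_or, not_and] at hx
    unfold solStep
    have h1 : PySem.List.pyGet? ((M ++ [x]) ++ [a]) (-1) = some a :=
      PySem.List.pyGet?_neg_one_append_singleton _ _
    have h2 : PySem.List.pyGet? ((M ++ [x]) ++ [a]) (-2) = some x := by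
      rw [PySem.List.pyGet?_neg_ofNat _ 2 (by omega) (by simp)]
      simp
    simp only [List.length_append, List.length_cons, List.length_nil]
    rw [if_pos (by omega)]
    split_ifs with c1 c2 c3
    · exact absurd (Option.some.inj (h1.symm.trans c1.1))
        (hx.1 (Option.some.inj (h2.symm.trans c1.2)))
    · exact absurd (Option.some.inj (h1.symm.trans c2.1))
        (hx.2.1 (Option.some.inj (h2.symm.trans c2.2)))
    · exact absurd (Option.some.inj (h1.symm.trans c3.1))
        (hx.2.2 (Option.some.inj (h2.symm.trans c3.2)))
    · rfl

theorem solStep_cancel (L : List Char) (o c : Char) (h : pvMatched o c) :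
    solStep (solStep L o) c = L := by
  have hpush : solStep L o = L ++ [o] := by
    apply solStep_push
    intro x _ hm
    unfold pvMatched at h hm
    rcases h with ⟨rfl, rfl⟩ | ⟨rfl, rfl⟩ | ⟨rfl, rfl⟩ <;>
      rcases hm with ⟨-, hh⟩ | ⟨-, hh⟩ | ⟨-, hh⟩ <;> simp at hh
  rw [hpush]
  unfold solStep
  have h1 : PySem.List.pyGet? ((L ++ [o]) ++ [c]) (-1) = some c :=
    PySem.List.pyGet?_neg_one_append_singleton _ _
  have h2 : PySem.List.pyGet? ((L ++ [o]) ++ [c]) (-2) = some o := by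
    rw [PySem.List.pyGet?_neg_ofNat _ 2 (by omega) (by simp)]
    simp
  simp only [List.length_append, List.length_cons, List.length_nil]
  rw [if_pos (by omega)]
  unfold pvMatched at h
  rcases h with ⟨rfl, rfl⟩ | ⟨rfl, rfl⟩ | ⟨rfl, rfl⟩
  · rw [if_pos ⟨h1, h2⟩, List.dropLast_concat, List.dropLast_concat]
  · rw [if_neg (by rintro ⟨u, -⟩; exact absurd (Option.some.inj (h1.symm.trans u)) (by decide)),
      if_pos ⟨h1, h2⟩, List.dropLast_concat, List.dropLast_concat]
  · rw [if_neg (by rintro ⟨u, -⟩; exact absurd (Option.some.inj (h1.symm.trans u)) (by decide)),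
      if_neg (by rintro ⟨u, -⟩; exact absurd (Option.some.inj (h1.symm.trans u)) (by decide)),
      if_pos ⟨h1, h2⟩, List.dropLast_concat, List.dropLast_concat]

theorem stack_remPair (o c : Char) (h : pvMatched o c) (l : List Char) :
    ∀ L, (remPair o c l).foldl solStep L = l.foldl solStep L := by
  fun_induction remPair o c l with
  | case1 => intro L; rfl
  | case2 => intro L; rfl
  | case3 a b t hc ih =>
      intro L
      obtain ⟨rfl, rfl⟩ := hc
      rw [ih L]
      simp only [List.foldl_cons]
      rw [solStep_cancel L a b h]
  | case4 a b t hc ih =>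
      intro L
      simp only [List.foldl_cons]
      exact ih (solStep L a)

theorem stack_rep3 (l : List Char) (L : List Char) :
    (rep3 l).foldl solStep L = l.foldl solStep L := by
  unfold rep3
  rw [replace_pair, replace_pair, replace_pair]
  rw [stack_remPair '{' '}' (Or.inr (Or.inr ⟨rfl, rfl⟩)) _ L,
      stack_remPair '[' ']' (Or.inl ⟨rfl, rfl⟩) _ L,
      stack_remPair '(' ')' (Or.inr (Or.inl ⟨rfl, rfl⟩)) _ L]

theorem stack_reduceGo : ∀ (fuel : Nat) (t : List Char) (L : List Char),
    (reduceGo fuel t).foldl solStep L = t.foldl solStep L := by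
  intro fuel
  induction fuel with
  | zero => intro t L; rfl
  | succ n ih =>
      intro t L
      simp only [reduceGo]
      by_cases hfix : rep3 t = t
      · simp [hfix]
      · simp only [if_neg hfix]
        rw [ih]
        exact stack_rep3 t L

theorem reduceGo_fixed : ∀ (fuel : Nat) (t : List Char), t.length < fuel →
    rep3 (reduceGo fuel t) = reduceGo fuel t := by
  intro fuel
  induction fuel with
  | zero => intro t h; omega
  | succ n ih =>
      intro t h
      simp only [reduceGo]
      by_cases hfix : rep3 t = t
      · simp [hfix]
      · simp only [if_neg hfix]
        apply ih
        rcases rep3_eq_or_lt t with h1 | h1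
        · exact absurd h1 hfix
        · omega

theorem stack_reduceLoop (t : List Char) :
    ∀ L, (reduceLoop t).foldl solStep L = t.foldl solStep L := by
  intro L
  unfold reduceLoop
  exact stack_reduceGo _ t L

theorem reduceLoop_fixed (t : List Char) : rep3 (reduceLoop t) = reduceLoop t := by
  unfold reduceLoop
  exact reduceGo_fixed _ t (by omega)

theorem remPair_eq_self (o c : Char) (l : List Char) (h : remPair o c l = l) :
    List.IsChain (fun a b => ¬(a = o ∧ b = c)) l := by
  fun_induction remPair o c l with
  | case1 => exact .nil
  | case2 a => exact .singleton a
  | case3 a b t hc ih =>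
      exfalso
      have hle := remPair_le o c t
      have := congrArg List.length h
      simp only [List.length_cons] at this
      omega
  | case4 a b t hc ih =>
      have h' : remPair o c (b :: t) = b :: t := by injection h
      exact List.isChain_cons_cons.mpr ⟨hc, ih h'⟩

theorem rep3_fix_chains (u : List Char) (h : rep3 u = u) :
    List.IsChain (fun a b => ¬ pvMatched a b) u := by
  unfold rep3 at h
  rw [replace_pair, replace_pair, replace_pair] at h
  have a1 := remPair_le '(' ')' u
  have a2 := remPair_le '[' ']' (remPair '(' ')' u)
  have a3 := remPair_le '{' '}' (remPair '[' ']' (remPair '(' ')' u))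
  have hlen := congrArg List.length h
  have e1 : remPair '(' ')' u = u := by
    rcases remPair_eq_or_lt '(' ')' u with h1 | h1
    · exact h1
    · omega
  rw [e1] at h a2 a3
  have e2 : remPair '[' ']' u = u := by
    rcases remPair_eq_or_lt '[' ']' u with h2 | h2
    · exact h2
    · rw [e1] at hlen; omega
  rw [e2] at h
  have c1 := remPair_eq_self _ _ _ e1
  have c2 := remPair_eq_self _ _ _ e2
  have c3 := remPair_eq_self _ _ _ h
  rw [List.isChain_iff_forall_rel_of_append_cons_cons] at c1 c2 c3 ⊢
  intro a b l1 l2 heq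
  have := c1 heq; have := c2 heq; have := c3 heq
  simp only [pvMatched]
  tauto

theorem stack_of_chain (u : List Char) :
    ∀ acc, List.IsChain (fun a b => ¬ pvMatched a b) (acc ++ u) →
      u.foldl solStep acc = acc ++ u := by
  induction u with
  | nil => intro acc _; simp
  | cons a u' ih =>
      intro acc hch
      have hb := (List.isChain_append.mp hch).2.2
      have hpush : solStep acc a = acc ++ [a] := by
        apply solStep_push
        intro x hx hm
        exact hb x (by simp [hx]) a (by simp) hm
      simp only [List.foldl_cons, hpush]
      rw [ih (acc ++ [a]) (by simpa using hch)]
      simp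

theorem check_iff (t : List Char) :
    t.foldl solStep [] = [] ↔ reduceLoop t = [] := by
  constructor
  · intro h
    have hu : (reduceLoop t).foldl solStep [] = [] := by
      rw [stack_reduceLoop t []]; exact h
    have hch := rep3_fix_chains _ (reduceLoop_fixed t)
    have := stack_of_chain (reduceLoop t) [] (by simpa using hch)
    rw [this] at hu
    simpa using hu
  · intro h
    have := stack_reduceLoop t []
    rw [h] at this
    simpa using this.symm

theorem inner_eq (cur : List Char) :
    (PySem.List.pyRange 0 (cur.length : Int) 1).foldl
      (fun lst i => solStep lst (PySem.List.pyGetD cur i ' ')) []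
    = cur.foldl solStep [] := by
  have hm : ((PySem.List.pyRange 0 (cur.length : Int) 1).map
      (fun i => PySem.List.pyGetD cur i ' ')).foldl solStep []
      = cur.foldl solStep [] := by
    rw [show ((cur.length : Int)) = PySem.List.len cur from by simp [PySem.List.len_eq]]
    rw [PySem.List.map_pyGetD_pyRange_zero]
  rw [List.foldl_map] at hm
  exact hm

theorem rot_step (l : List Char) (j : Nat) (hj : j < l.length) :
    (l.drop j ++ l.take j).tail ++ (l.drop j ++ l.take j).take 1
      = l.drop (j + 1) ++ l.take (j + 1) := by
  rw [List.drop_eq_getElem_cons hj]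
  simp only [List.cons_append, List.tail_cons, List.take_succ_cons, List.take_zero]
  rw [List.take_add_one]
  simp [List.getElem?_eq_getElem hj]

theorem outer_eq (s0 : List Char) : ∀ (m j : Nat), j + m ≤ s0.length → ∀ cnt : Int,
    ((List.range' j m).foldl
      (fun (st : List Char × Int) (_ : Nat) =>
        (PySem.List.slice st.1 (some 1) none ++ PySem.List.slice st.1 (some 0) (some 1),
         if ((PySem.List.pyRange 0 (st.1.length : Int) 1).foldl
              (fun lst i => solStep lst (PySem.List.pyGetD st.1 i ' ')) []).length = 0
         then st.2 + 1 else st.2))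
      (s0.drop j ++ s0.take j, cnt)).2
    = (List.range' j m).foldl
        (fun (cnt : Int) (k : Nat) =>
          if reduceLoop (PySem.List.slice s0 (some (k : Int)) none ++
              PySem.List.slice s0 none (some (k : Int))) = [] then cnt + 1 else cnt) cnt := by
  intro m
  induction m with
  | zero => intro j _ cnt; simp
  | succ m ih =>
      intro j hj cnt
      rw [List.range'_succ]
      simp only [List.foldl_cons]
      have hjlt : j < s0.length := by omega
      have hrot : PySem.List.slice (s0.drop j ++ s0.take j) (some 1) none ++
          PySem.List.slice (s0.drop j ++ s0.take j) (some 0) (some 1)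
          = s0.drop (j + 1) ++ s0.take (j + 1) := by
        rw [PySem.List.slice_from_one]
        rw [PySem.List.slice_zero_start,
          PySem.List.slice_to (xs := s0.drop j ++ s0.take j) (b := 1) (by norm_num)]
        have h1 : ((1 : Int)).toNat = 1 := rfl
        rw [h1]
        exact rot_step s0 j hjlt
      have hcnt : (if ((PySem.List.pyRange 0 (((s0.drop j ++ s0.take j)).length : Int) 1).foldl
            (fun lst i => solStep lst (PySem.List.pyGetD (s0.drop j ++ s0.take j) i ' ')) []).length = 0
            then cnt + 1 else cnt)
          = (if reduceLoop (PySem.List.slice s0 (some (j : Int)) none ++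
              PySem.List.slice s0 none (some (j : Int))) = [] then cnt + 1 else cnt) := by
        rw [PySem.List.slice_from_natCast, PySem.List.slice_to_natCast]
        rw [inner_eq]
        congr 1
        rw [List.length_eq_zero_iff, eq_iff_iff]
        exact check_iff _
      simp only [hrot, hcnt]
      exact ih (j + 1) (by omega) _

-- ===== VERDICT (by name: the statement is the Claim_ definition above) =====
theorem solution_spec : Claim_equal_solution := by
  unfold Claim_equal_solution
  intro s _
  unfold Spec_solution solution solution_alt
  simp only [PySem.List.pyRange_zero_natCast, List.foldl_map, List.range_eq_range']
  have h := outer_eq s.toList s.toList.length 0 (by omega) 0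
  simp only [List.drop_zero, List.take_zero, List.append_nil] at h
  simp only [PySem.List.pyRange_zero_natCast, List.foldl_map, List.range_eq_range'] at h
  exact h
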